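-- pv_equiv track=rewrite | github.com/ktrocks3/VideoEditing | GetFrames.py | best_grid
-- ===== SOURCE A (Python) =====
-- import math
--
-- def best_grid(n, tile_w, tile_h):
--     """
--     Pick cols/rows so the final collage is as close to square as possible.
--     """
--     best = None
--
--     for cols in range(1, n + 1):
--         rows = math.ceil(n / cols)
--         width = cols * tile_w
--         height = rows * tile_h
--         score = abs(width - height)  # closer to square is better
--
--         if best is None or score < best[0]:
--             best = (score, cols, rows)
--
--     return best[1], best[2]
-- ===== SOURCE B (Python) =====
-- def best_grid(n, tile_w, tile_h):
--     """
--     Pick cols/rows so the final collage is as close to square as possible.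
--     O(sqrt(n)): enumerate the O(sqrt(n)) blocks of cols sharing the same
--     rows = ceil(n/cols); within a block the score |cols*tile_w - rows*tile_h|
--     is V-shaped in cols, so only ~2 candidate cols per block need checking.
--     """
--     best = None
--     lo = 1
--     while lo <= n:
--         rows = -(-n // lo)                                  # ceil(n / lo)
--         hi = n if rows == 1 else (n - 1) // (rows - 1)      # last cols with this rows
--         K = rows * tile_h
--         if tile_w == 0:
--             cands = [lo]                                    # score constant on the block
--         else:
--             q = K // tile_w                                 # real minimiser of |c*tile_w - K|
--             cands = []
--             if q >= lo:
--                 cands.append(min(q, hi))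
--             if q + 1 <= hi:
--                 cands.append(max(q + 1, lo))
--         for c in cands:
--             score = abs(c * tile_w - K)
--             if best is None or score < best[0]:
--                 best = (score, c, rows)
--         lo = hi + 1
--     return best[1], best[2]
-- ===== Notes on version B (the rewrite author's own statement) =====
-- stated objective: faster
-- what changed: Instead of scanning every cols in 1..n, B enumerates the O(sqrt(n)) blocks of cols sharing the same rows = ceil(n/cols) and, since the score |cols*tile_w - rows*tile_h| is V-shaped in cols on each block, evaluates only the ~2 candidate cols around the block's minimiser.
import Mathlib
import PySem

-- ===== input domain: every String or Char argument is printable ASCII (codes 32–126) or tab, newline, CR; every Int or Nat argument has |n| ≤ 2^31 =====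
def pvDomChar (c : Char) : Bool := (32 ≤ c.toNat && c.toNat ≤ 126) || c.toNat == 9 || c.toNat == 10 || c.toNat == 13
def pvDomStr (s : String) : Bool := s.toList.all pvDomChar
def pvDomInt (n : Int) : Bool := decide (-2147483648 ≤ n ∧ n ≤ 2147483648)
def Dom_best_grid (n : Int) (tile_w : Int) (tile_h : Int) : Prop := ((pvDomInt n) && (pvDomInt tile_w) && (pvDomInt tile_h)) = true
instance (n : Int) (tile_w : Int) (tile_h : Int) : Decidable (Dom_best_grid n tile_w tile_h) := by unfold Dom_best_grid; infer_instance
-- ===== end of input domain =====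

-- B replaces A's O(n) scan over all cols by an O(√n) scan over the blocks of cols sharing
-- the same rows = ceil(n/cols), checking only the ~2 V-shape candidate cols per block.

-- ===== PORT A =====
-- one iteration of A's for-loop; math.ceil(n/cols) is ported as the exact integer
-- ceiling -((-n)//cols), which equals the float computation for |n| ≤ 2^31 < 2^53
def bgStep (n tile_w tile_h : Int) (best : Option (Int × Int × Int)) (cols : Int) :
    Option (Int × Int × Int) :=
  let rows : Int := -(PySem.Int.floordiv (-n) cols)
  let width := cols * tile_w
  let height := rows * tile_h
  let score := |width - height|
  match best with
  | none => some (score, cols, rows)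
  | some b => if score < b.1 then some (score, cols, rows) else some b

def best_grid (n : Int) (tile_w : Int) (tile_h : Int) : List Int :=
  match (PySem.List.pyRange 1 (n + 1) 1).foldl (bgStep n tile_w tile_h) none with
  | some (_, c, r) => [c, r]
  | none => []   -- best is still None: Python raises TypeError here (n < 1); excluded by Pre_

-- ===== PORT B =====
-- the while-loop of Source B, with a fuel counter as totality guard: lo grows by at least 1
-- per iteration, so n.toNat iterations always suffice and the fuel never runs out
def bgLoop (n tile_w tile_h : Int) (fuel : Nat) (lo : Int) (best : Option (Int × Int × Int)) :
    Option (Int × Int × Int) :=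
  match fuel with
  | 0 => best
  | fuel + 1 =>
    if lo ≤ n then
      let rows : Int := -(PySem.Int.floordiv (-n) lo)
      let hi : Int := if rows = 1 then n else PySem.Int.floordiv (n - 1) (rows - 1)
      let K := rows * tile_h
      let cands : List Int :=
        if tile_w = 0 then [lo]
        else
          let q := PySem.Int.floordiv K tile_w
          (if lo ≤ q then [min q hi] else []) ++ (if q + 1 ≤ hi then [max (q + 1) lo] else [])
      let best := cands.foldl (fun b c =>
        let score := |c * tile_w - K|
        match b with
        | none => some (score, c, rows)
        | some b => if score < b.1 then some (score, c, rows) else some b) best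
      bgLoop n tile_w tile_h fuel (hi + 1) best
    else best

def best_grid_alt (n : Int) (tile_w : Int) (tile_h : Int) : List Int :=
  match bgLoop n tile_w tile_h n.toNat 1 none with
  | some (_, c, r) => [c, r]
  | none => []

-- ===== PRECONDITION & SPEC =====
-- Pre_ excludes exactly n < 1, where A's loop body never runs and `best[1]` raises TypeError
def Pre_best_grid (n : Int) (tile_w : Int) (tile_h : Int) : Prop := 1 ≤ n
instance (n : Int) (tile_w : Int) (tile_h : Int) : Decidable (Pre_best_grid n tile_w tile_h) := by
  unfold Pre_best_grid; infer_instance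

def pvWitness_best_grid : Int × Int × Int := (7, 3, 2)

def Spec_best_grid (n : Int) (tile_w : Int) (tile_h : Int) (out : List Int) : Prop := out = best_grid_alt n tile_w tile_h
instance (n : Int) (tile_w : Int) (tile_h : Int) (out : List Int) : Decidable (Spec_best_grid n tile_w tile_h out) := by unfold Spec_best_grid; infer_instance

-- ===== CLAIM (what is proved, stated in full; the proofs are below) =====
def Claim_equal_best_grid : Prop := ∀ (n : Int) (tile_w : Int) (tile_h : Int), Dom_best_grid n tile_w tile_h → Pre_best_grid n tile_w tile_h → Spec_best_grid n tile_w tile_h (best_grid n tile_w tile_h)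

-- ===== LEMMAS AND PROOFS =====

-- the triple A records for a given cols value
def bgTrip (n w h c : Int) : Int × Int × Int :=
  (|c * w - -(PySem.Int.floordiv (-n) c) * h|, c, -(PySem.Int.floordiv (-n) c))

def bgUpd (b : Option (Int × Int × Int)) (t : Int × Int × Int) : Option (Int × Int × Int) :=
  match b with
  | none => some t
  | some b => if t.1 < b.1 then some t else some b

def bgMerge (s r : Option (Int × Int × Int)) : Option (Int × Int × Int) :=
  match r with
  | none => s
  | some t => bgUpd s t

theorem bgFoldlExt {α β : Type} (f g : α → β → α) :
    ∀ (l : List β) (s : α), (∀ a b, b ∈ l → f a b = g a b) → l.foldl f s = l.foldl g s := by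
  intro l
  induction l with
  | nil => intro s _; rfl
  | cons b l ih =>
    intro s hfg
    simp only [List.foldl_cons]
    rw [hfg s b List.mem_cons_self]
    exact ih _ (fun a b hb => hfg a b (List.mem_cons_of_mem _ hb))

-- d beats c in A's first-strict-minimum order (smaller score, or equal score and not later)
def Dominates (f : Int → Int) (d c : Int) : Prop := f d < f c ∨ (f d = f c ∧ d ≤ c)

def BgBest (f : Int → Int) (cs : List Int) (r : Int) : Prop :=
  r ∈ cs ∧ ∀ c ∈ cs, Dominates f r c

theorem dominates_refl (f : Int → Int) (c : Int) : Dominates f c c := Or.inr ⟨rfl, le_refl _⟩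

theorem dominates_trans (f : Int → Int) {a b c : Int}
    (h1 : Dominates f a b) (h2 : Dominates f b c) : Dominates f a c := by
  rcases h1 with h1 | ⟨h1, h1'⟩ <;> rcases h2 with h2 | ⟨h2, h2'⟩
  · exact Or.inl (lt_trans h1 h2)
  · exact Or.inl (h2 ▸ h1)
  · exact Or.inl (h1 ▸ h2)
  · exact Or.inr ⟨h1.trans h2, h1'.trans h2'⟩

theorem bgBest_unique (f : Int → Int) {cs : List Int} {r r' : Int}
    (h : BgBest f cs r) (h' : BgBest f cs r') : r = r' := by
  have d1 := h.2 r' h'.1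
  have d2 := h'.2 r h.1
  unfold Dominates at d1 d2
  omega

theorem foldl_upd_merge (l : List (Int × Int × Int)) :
    ∀ s, l.foldl bgUpd s = bgMerge s (l.foldl bgUpd none) := by
  induction l with
  | nil => intro s; rfl
  | cons t l ih =>
    intro s
    simp only [List.foldl_cons]
    rw [ih (bgUpd s t), ih (bgUpd none t)]
    have : ∀ r, bgMerge (bgUpd s t) r = bgMerge s (bgMerge (bgUpd none t) r) := by
      intro r
      match r with
      | none => rfl
      | some u =>
        match s with
        | none =>
          by_cases h1 : u.1 < t.1 <;> simp [bgMerge, bgUpd, h1]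
        | some b =>
          by_cases h1 : u.1 < t.1 <;> by_cases h2 : t.1 < b.1
          · have h3 : u.1 < b.1 := lt_trans h1 h2
            simp [bgMerge, bgUpd, h1, h2, h3]
          · simp [bgMerge, bgUpd, h1, h2]
          · simp [bgMerge, bgUpd, h1, h2]
          · have h3 : ¬ u.1 < b.1 := by omega
            simp [bgMerge, bgUpd, h1, h2, h3]
    rw [this]

-- fold with a running best over a strictly increasing tail computes the BgBest element
theorem fold_some (trip : Int → Int × Int × Int) (f : Int → Int)
    (htrip : ∀ c, (trip c).1 = f c) :
    ∀ (cs : List Int), cs.Pairwise (· < ·) → ∀ (b : Int), (∀ c ∈ cs, b < c) →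
      ∃ r, BgBest f (b :: cs) r ∧
        (cs.map trip).foldl bgUpd (some (trip b)) = some (trip r) := by
  intro cs
  induction cs with
  | nil =>
    intro _ b _
    exact ⟨b, ⟨List.mem_singleton.mpr rfl,
      by intro c hc; rw [List.mem_singleton.mp hc]; exact dominates_refl f b⟩, rfl⟩
  | cons c cs ih =>
    intro hp b hb
    have hcc : ∀ x ∈ cs, c < x := (List.pairwise_cons.mp hp).1
    have hp' : cs.Pairwise (· < ·) := (List.pairwise_cons.mp hp).2
    have hbc : b < c := hb c (List.mem_cons_self)
    -- the new accumulator after one step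
    set b' : Int := if f c < f b then c else b with hb'
    have hstep : bgUpd (some (trip b)) (trip c) = some (trip b') := by
      simp only [bgUpd, htrip, hb']
      split <;> rfl
    have hb'mem : b' = b ∨ b' = c := by by_cases h : f c < f b <;> simp [hb', h]
    have hb'lt : ∀ x ∈ cs, b' < x := by
      intro x hx
      rcases hb'mem with h | h
      · rw [h]; exact hb x (List.mem_cons_of_mem _ hx)
      · rw [h]; exact hcc x hx
    obtain ⟨r, hrbest, hrfold⟩ := ih hp' b' hb'lt
    refine ⟨r, ⟨?_, ?_⟩, ?_⟩
    · rcases List.mem_cons.mp hrbest.1 with h | h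
      · rcases hb'mem with h2 | h2 <;> rw [h, h2] <;> simp
      · simp [List.mem_cons, h]
    · -- r dominates everything in b :: c :: cs
      have hdb' : Dominates f r b' := hrbest.2 b' (List.mem_cons_self)
      have hdomb : Dominates f r b := by
        refine dominates_trans f hdb' ?_
        by_cases h : f c < f b
        · exact Or.inl (by simp only [hb', if_pos h]; exact h)
        · simp only [hb', if_neg h]; exact dominates_refl f b
      have hdomc : Dominates f r c := by
        refine dominates_trans f hdb' ?_
        by_cases h : f c < f b
        · simp only [hb', if_pos h]; exact dominates_refl f c
        · simp only [hb', if_neg h]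
          rcases lt_or_eq_of_le (not_lt.mp h) with h2 | h2
          · exact Or.inl h2
          · exact Or.inr ⟨h2, le_of_lt hbc⟩
      intro x hx
      rcases List.mem_cons.mp hx with h | hx2
      · exact h ▸ hdomb
      rcases List.mem_cons.mp hx2 with h | hx3
      · exact h ▸ hdomc
      · exact hrbest.2 x (List.mem_cons_of_mem _ hx3)
    · simpa [hstep] using hrfold

theorem fold_none_best (trip : Int → Int × Int × Int) (f : Int → Int)
    (htrip : ∀ c, (trip c).1 = f c)
    (cs : List Int) (hp : cs.Pairwise (· < ·)) (hne : cs ≠ []) :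
    ∃ r, BgBest f cs r ∧ (cs.map trip).foldl bgUpd none = some (trip r) := by
  match cs with
  | [] => exact absurd rfl hne
  | c :: cs =>
    obtain ⟨r, hb, hf⟩ := fold_some trip f htrip cs (List.pairwise_cons.mp hp).2 c
      (List.pairwise_cons.mp hp).1
    exact ⟨r, hb, by simpa [bgUpd] using hf⟩

-- pruning: folding over a dominating sorted sublist yields the same best
theorem fold_eq_subset (trip : Int → Int × Int × Int) (f : Int → Int)
    (htrip1 : ∀ c, (trip c).1 = f c)
    (cs1 cs2 : List Int) (h1 : cs1.Pairwise (· < ·)) (h2 : cs2.Pairwise (· < ·))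
    (hsub : ∀ c ∈ cs2, c ∈ cs1)
    (hdom : ∀ c ∈ cs1, ∃ d ∈ cs2, Dominates f d c) (hne : cs2 ≠ []) :
    (cs1.map trip).foldl bgUpd none = (cs2.map trip).foldl bgUpd none := by
  have hne1 : cs1 ≠ [] := by
    match cs2, hne with
    | c :: _, _ => intro h; exact absurd (hsub c List.mem_cons_self) (by simp [h])
  obtain ⟨r1, hb1, hf1⟩ := fold_none_best trip f htrip1 cs1 h1 hne1
  obtain ⟨r2, hb2, hf2⟩ := fold_none_best trip f htrip1 cs2 h2 hne
  have hb2' : BgBest f cs1 r2 := by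
    refine ⟨hsub r2 hb2.1, ?_⟩
    intro c hc
    obtain ⟨d, hd, hdc⟩ := hdom c hc
    exact dominates_trans f (hb2.2 d hd) hdc
  rw [hf1, hf2, bgBest_unique f hb1 hb2']

-- ceiling-division characterisation of rows = ceil(n/c)
theorem cdiv_char (n c r : Int) (hc : 0 < c) :
    -(PySem.Int.floordiv (-n) c) = r ↔ (r - 1) * c < n ∧ n ≤ r * c :=
  PySem.Int.neg_floordiv_neg_eq_iff_of_pos hc

-- block facts: for 1 ≤ lo ≤ n, with r = ceil(n/lo) and hi the block end,
-- we have lo ≤ hi ≤ n and ceil(n/c) = r on the whole block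
theorem block_facts (n lo : Int) (hlo : 1 ≤ lo) (hn : lo ≤ n) :
    1 ≤ -(PySem.Int.floordiv (-n) lo) ∧
    (let r := -(PySem.Int.floordiv (-n) lo)
     let hi := if r = 1 then n else PySem.Int.floordiv (n - 1) (r - 1)
     lo ≤ hi ∧ hi ≤ n ∧ ∀ c, lo ≤ c → c ≤ hi → -(PySem.Int.floordiv (-n) c) = r) := by
  set r := -(PySem.Int.floordiv (-n) lo) with hrdef
  have hr : (r - 1) * lo < n ∧ n ≤ r * lo := (cdiv_char n lo r (by omega)).mp hrdef.symm
  have hrpos : 1 ≤ r := by nlinarith [hr.2]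
  refine ⟨hrpos, ?_⟩
  by_cases h1 : r = 1
  · simp only [h1]
    refine ⟨hn, le_refl n, ?_⟩
    intro c hc1 hc2
    rw [cdiv_char n c 1 (by omega)]
    constructor
    · nlinarith
    · have : n ≤ lo := by nlinarith [hr.2, h1]
      omega
  · have hr2 : 2 ≤ r := by omega
    simp only [if_neg h1]
    set hi := PySem.Int.floordiv (n - 1) (r - 1) with hhidef
    have hrm1 : (0:Int) < r - 1 := by omega
    have hlohi : lo ≤ hi := by
      rw [hhidef, PySem.Int.le_floordiv_iff_mul_le hrm1]
      nlinarith [hr.1]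
    have hhin : hi ≤ n := by
      have : hi < n := by
        rw [hhidef, PySem.Int.floordiv_lt_iff_lt_mul hrm1]
        nlinarith
      omega
    refine ⟨hlohi, hhin, ?_⟩
    intro c hc1 hc2
    rw [cdiv_char n c r (by omega)]
    constructor
    · have : c * (r - 1) ≤ n - 1 := by
        rw [← PySem.Int.le_floordiv_iff_mul_le hrm1]; exact hc2
      nlinarith
    · calc n ≤ r * lo := hr.2
        _ ≤ r * c := by nlinarith

-- floor-division bracket for any nonzero divisor
theorem fdiv_brackets (K w : Int) (_hw : w ≠ 0) :
    (0 < w → PySem.Int.floordiv K w * w ≤ K ∧ K < (PySem.Int.floordiv K w + 1) * w) ∧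
    (w < 0 → K ≤ PySem.Int.floordiv K w * w ∧ (PySem.Int.floordiv K w + 1) * w < K) := by
  constructor
  · intro hpos
    exact (PySem.Int.floordiv_eq_iff_of_pos hpos).mp rfl
  · intro hneg
    have h := (PySem.Int.floordiv_eq_iff_of_pos (show (0:Int) < -w by omega)).mp
      (PySem.Int.floordiv_neg_neg K w)
    constructor <;> nlinarith [h.1, h.2]

-- left arm of the V: strictly decreasing up to q = (K // w)
theorem v_left (K w c c' : Int) (hw : w ≠ 0) (hcc : c < c')
    (hq : c' ≤ PySem.Int.floordiv K w) : |c' * w - K| < |c * w - K| := by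
  have hb := fdiv_brackets K w hw
  rcases lt_or_gt_of_ne hw with hneg | hpos
  · obtain ⟨ha, _⟩ := hb.2 hneg
    have h2 : K ≤ c' * w := le_trans ha (mul_le_mul_of_nonpos_right hq hneg.le)
    have h3 : c' * w < c * w := mul_lt_mul_of_neg_right hcc hneg
    rw [abs_of_nonneg (by omega), abs_of_nonneg (by omega)]; omega
  · obtain ⟨ha, _⟩ := hb.1 hpos
    have h2 : c' * w ≤ K := le_trans (mul_le_mul_of_nonneg_right hq hpos.le) ha
    have h3 : c * w < c' * w := mul_lt_mul_of_pos_right hcc hpos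
    rw [abs_of_nonpos (by omega), abs_of_nonpos (by omega)]; omega

-- right arm of the V: nondecreasing from q + 1 on
theorem v_right (K w c c' : Int) (hw : w ≠ 0) (hcc : c ≤ c')
    (hq : PySem.Int.floordiv K w + 1 ≤ c) : |c * w - K| ≤ |c' * w - K| := by
  have hb := fdiv_brackets K w hw
  rcases lt_or_gt_of_ne hw with hneg | hpos
  · obtain ⟨_, ha⟩ := hb.2 hneg
    have h2 : c * w < K := lt_of_le_of_lt (mul_le_mul_of_nonpos_right hq hneg.le) ha
    have h3 : c' * w ≤ c * w := mul_le_mul_of_nonpos_right hcc hneg.le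
    rw [abs_of_nonpos (by omega), abs_of_nonpos (by omega)]; omega
  · obtain ⟨_, ha⟩ := hb.1 hpos
    have h2 : K < c * w := lt_of_lt_of_le ha (mul_le_mul_of_nonneg_right hq hpos.le)
    have h3 : c * w ≤ c' * w := mul_le_mul_of_nonneg_right hcc hpos.le
    rw [abs_of_nonneg (by omega), abs_of_nonneg (by omega)]; omega

-- the candidate list of a block: contained in [lo,hi], sorted, nonempty, dominating
theorem cands_good (K w lo hi : Int) (hlohi : lo ≤ hi) :
    let cands : List Int :=
      if w = 0 then [lo]
      else
        let q := PySem.Int.floordiv K w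
        (if lo ≤ q then [min q hi] else []) ++ (if q + 1 ≤ hi then [max (q + 1) lo] else [])
    (∀ d ∈ cands, lo ≤ d ∧ d ≤ hi) ∧ cands.Pairwise (· < ·) ∧ cands ≠ [] ∧
      ∀ c, lo ≤ c → c ≤ hi → ∃ d ∈ cands, Dominates (fun c => |c * w - K|) d c := by
  by_cases hw : w = 0
  · subst hw
    rw [if_pos rfl]
    refine ⟨by simp [hlohi], by simp, by simp, ?_⟩
    intro c hc1 _
    exact ⟨lo, by simp, Or.inr ⟨by simp, hc1⟩⟩
  · simp only [if_neg hw]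
    set q := PySem.Int.floordiv K w with hqdef
    set cands : List Int :=
      (if lo ≤ q then [min q hi] else []) ++ (if q + 1 ≤ hi then [max (q + 1) lo] else [])
      with hcdef
    have hmem : ∀ d ∈ cands, lo ≤ d ∧ d ≤ hi := by
      intro d hd
      rw [hcdef, List.mem_append] at hd
      rcases hd with hd | hd <;>
        · split at hd <;> simp_all
    refine ⟨hmem, ?_, ?_, ?_⟩
    · rw [hcdef]
      by_cases h1 : lo ≤ q <;> by_cases h2 : q + 1 ≤ hi <;> simp [h1, h2]
    · rw [hcdef]
      by_cases h1 : lo ≤ q <;> by_cases h2 : q + 1 ≤ hi <;> simp [h1, h2]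
      omega
    · intro c hc1 hc2
      by_cases hcq : c ≤ q
      · -- left arm: min q hi dominates
        have h1 : lo ≤ q := le_trans hc1 hcq
        have hdm : min q hi ∈ cands := by rw [hcdef]; simp [h1]
        refine ⟨min q hi, hdm, ?_⟩
        rcases eq_or_lt_of_le (le_min hcq hc2) with heq | hlt
        · exact Or.inr ⟨by rw [heq], by omega⟩
        · exact Or.inl (v_left K w c (min q hi) hw hlt (min_le_left _ _))
      · -- right arm: max (q+1) lo dominates
        have h2 : q + 1 ≤ hi := by omega
        have hdm : max (q + 1) lo ∈ cands := by rw [hcdef]; simp [h2]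
        refine ⟨max (q + 1) lo, hdm, ?_⟩
        have hdc : max (q + 1) lo ≤ c := max_le (by omega) hc1
        have := v_right K w (max (q + 1) lo) c hw hdc (le_max_left _ _)
        rcases lt_or_eq_of_le this with h | h
        · exact Or.inl h
        · exact Or.inr ⟨h, hdc⟩

-- A's loop step is bgUpd applied to the recorded triple
theorem bgStep_eq (n w h : Int) (b : Option (Int × Int × Int)) (c : Int) :
    bgStep n w h b c = bgUpd b (bgTrip n w h c) := by
  simp only [bgStep, bgUpd, bgTrip]

-- B's loop, started anywhere in [1, ∞), equals A's fold over the remaining cols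
theorem bgLoop_eq (n w h : Int) :
    ∀ (fuel : Nat) (lo : Int), (n + 1 - lo).toNat ≤ fuel → 1 ≤ lo →
      ∀ best, bgLoop n w h fuel lo best =
        ((PySem.List.pyRange lo (n + 1) 1).map (bgTrip n w h)).foldl bgUpd best := by
  intro fuel
  induction fuel with
  | zero =>
    intro lo hk _ best
    rw [PySem.List.pyRange_one_eq_nil (by omega)]
    rfl
  | succ fuel ih =>
    intro lo hk hlo best
    by_cases hln : lo ≤ n
    · obtain ⟨hrpos, hbf⟩ := block_facts n lo hlo hln
      set r := -(PySem.Int.floordiv (-n) lo) with hrdef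
      set hi : Int := if r = 1 then n else PySem.Int.floordiv (n - 1) (r - 1) with hhidef
      simp only at hbf
      obtain ⟨hlohi, hhin, hblock⟩ := hbf
      set K := r * h with hKdef
      set cands : List Int :=
        if w = 0 then [lo]
        else
          let q := PySem.Int.floordiv K w
          (if lo ≤ q then [min q hi] else []) ++ (if q + 1 ≤ hi then [max (q + 1) lo] else [])
        with hcdef
      obtain ⟨hmem, hpair, hne, hdom⟩ := cands_good K w lo hi hlohi
      -- one unfolding of bgLoop
      have hstep : bgLoop n w h (fuel + 1) lo best =
          bgLoop n w h fuel (hi + 1) (cands.foldl (fun b c =>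
            let score := |c * w - K|
            match b with
            | none => some (score, c, r)
            | some b => if score < b.1 then some (score, c, r) else some b) best) := by
        rw [bgLoop]
        simp only [if_pos hln, ← hrdef, ← hhidef, ← hKdef, ← hcdef]
      rw [hstep]
      -- inner fold = bgUpd-fold over the mapped candidate triples
      have htripeq : ∀ c ∈ cands, (|c * w - K|, c, r) = bgTrip n w h c := by
        intro c hc
        obtain ⟨h1, h2⟩ := hmem c hc
        simp only [bgTrip, hblock c h1 h2, hKdef]
      have hinner : (cands.foldl (fun b c =>
            let score := |c * w - K|
            match b with
            | none => some (score, c, r)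
            | some b => if score < b.1 then some (score, c, r) else some b) best) =
          (cands.map (bgTrip n w h)).foldl bgUpd best := by
        rw [List.foldl_map]
        apply bgFoldlExt
        intro b c hc
        rw [← htripeq c hc]
        rfl
      rw [hinner]
      -- recursion on the rest
      rw [ih (hi + 1) (by omega) (by omega)]
      -- split A's range at hi + 1 and use the pruning lemma on the block part
      have hsplit : PySem.List.pyRange lo (n + 1) 1 =
          PySem.List.pyRange lo (hi + 1) 1 ++ PySem.List.pyRange (hi + 1) (n + 1) 1 :=
        PySem.List.pyRange_one_append lo (hi + 1) (n + 1) (by omega) (by omega)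
      rw [hsplit, List.map_append, List.foldl_append]
      congr 1
      rw [foldl_upd_merge (cands.map (bgTrip n w h)) best,
        foldl_upd_merge ((PySem.List.pyRange lo (hi + 1) 1).map (bgTrip n w h)) best]
      congr 1
      refine Eq.symm ?_
      -- on the block, the score of bgTrip is |c*w - K|, so domination transfers
      have hdom' : ∀ c ∈ PySem.List.pyRange lo (hi + 1) 1,
          ∃ d ∈ cands, Dominates (fun c => (bgTrip n w h c).1) d c := by
        intro c hc
        rw [PySem.List.mem_pyRange_one] at hc
        obtain ⟨d, hd, hdc⟩ := hdom c hc.1 (by omega)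
        refine ⟨d, hd, ?_⟩
        obtain ⟨hd1, hd2⟩ := hmem d hd
        have e1 : (bgTrip n w h d).1 = |d * w - K| := by rw [← htripeq d hd]
        have e2 : (bgTrip n w h c).1 = |c * w - K| := by
          simp only [bgTrip, hblock c hc.1 (by omega), hKdef]
        simpa only [Dominates, e1, e2] using hdc
      exact fold_eq_subset (bgTrip n w h) (fun c => (bgTrip n w h c).1)
        (fun c => rfl)
        (PySem.List.pyRange lo (hi + 1) 1) cands
        (PySem.List.pairwise_lt_pyRange_one lo (hi + 1)) hpair
        (by intro c hc
            obtain ⟨h1, h2⟩ := hmem c hc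
            rw [PySem.List.mem_pyRange_one]; omega)
        hdom' hne
    · rw [bgLoop]
      simp only [if_neg hln]
      rw [PySem.List.pyRange_one_eq_nil (by omega)]
      rfl

-- A's fold is the bgUpd-fold over the recorded triples
theorem foldA_eq (n w h : Int) (l : List Int) (s : Option (Int × Int × Int)) :
    l.foldl (bgStep n w h) s = (l.map (bgTrip n w h)).foldl bgUpd s := by
  rw [List.foldl_map]
  exact bgFoldlExt _ _ l s (fun b c _ => bgStep_eq n w h b c)

-- ===== VERDICT (by name: the statement is the Claim_ definition above) =====
theorem best_grid_spec : Claim_equal_best_grid := by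
  intro n w h _ hpre
  unfold Spec_best_grid best_grid best_grid_alt
  rw [bgLoop_eq n w h n.toNat 1 (by omega) (le_refl 1) none, foldA_eq]
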